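-- pv_equiv track=rewrite | github.com/grlinski/euler-python-solutions | Euler Prize Strings.py | createNewWinners
-- ===== SOURCE A (Python) =====
-- def removeNonWinners(string1):
--     lcount = 0
--     acount = 0
--     for i in string1:
--         if i=='L':
--             lcount+=1
--
--     for i in range(0,len(string1)-2):
--         parts = string1[i:i+3]
--         if parts == 'AAA':
--             return False
--
--
--
--     if lcount > 1:
--         return False
--     return True
--
-- def createNewWinners(winners,segment5):
--     newWinners = []
--     for i in winners:
--         for j in segment5:
--             s =i+j
--             good = removeNonWinners(s)
--             if good:
--                 newWinners.append(s)
--     return newWinners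
-- ===== SOURCE B (Python) =====
-- def _scan(state, chunk):
--     # run the validity automaton over chunk starting from state
--     lc, run, dead = state
--     for ch in chunk:
--         if ch == 'L':
--             lc += 1
--         if ch == 'A':
--             run += 1
--             if run >= 3:
--                 dead = True
--         else:
--             run = 0
--     return lc, run, dead
--
--
-- def createNewWinners(winners, segment5):
--     # scan each winner once; per pair, continue the automaton over the
--     # segment only (winner strings are never rescanned)
--     wstates = [(w, _scan((0, 0, False), w)) for w in winners]
--     newWinners = []
--     for w, st in wstates:
--         for seg in segment5:
--             lc, run, dead = _scan(st, seg)
--             if not dead and lc <= 1: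
--                 newWinners.append(w + seg)
--     return newWinners
-- ===== Notes on version B (the rewrite author's own statement) =====
-- stated objective: faster
-- what changed: Replaces A's full rescan of every concatenation (an L-count pass plus a sliding 3-char-slice pass over w+seg for each pair) with a one-pass state automaton (L-count, trailing-A run, dead flag) computed once per winner and continued over only the appended segment per pair.
import Mathlib
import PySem

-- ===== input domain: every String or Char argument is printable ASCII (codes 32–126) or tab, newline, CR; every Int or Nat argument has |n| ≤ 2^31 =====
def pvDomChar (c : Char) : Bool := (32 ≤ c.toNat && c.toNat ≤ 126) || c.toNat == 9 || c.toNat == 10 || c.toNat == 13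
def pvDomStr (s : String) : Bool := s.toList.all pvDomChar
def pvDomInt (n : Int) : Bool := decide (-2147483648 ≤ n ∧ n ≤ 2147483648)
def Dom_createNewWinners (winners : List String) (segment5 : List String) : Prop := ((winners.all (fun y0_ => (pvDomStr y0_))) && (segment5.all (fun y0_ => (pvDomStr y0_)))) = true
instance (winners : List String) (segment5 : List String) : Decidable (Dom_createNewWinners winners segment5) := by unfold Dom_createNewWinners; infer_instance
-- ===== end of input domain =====

-- B replaces A's full rescan of each concatenation by a one-pass automaton state
-- computed once per winner and continued over the appended segment only (objective: faster).

-- ===== PORT A =====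
-- the 'AAA' window scan of removeNonWinners (early return False on a hit = returns true when a hit exists)
def rnwAAA (s : String) : List Int → Bool
  | [] => false
  | i :: rest => if PySem.Str.slice s (some i) (some (i + 3)) == "AAA" then true else rnwAAA s rest

def removeNonWinners (string1 : String) : Bool :=
  let lcount := string1.toList.foldl (fun acc c => if c == 'L' then acc + 1 else acc) (0 : Int)
  if rnwAAA string1 (PySem.List.pyRange 0 (PySem.Str.len string1 - 2) 1) then false
  else if lcount > 1 then false
  else true

def createNewWinners (winners : List String) (segment5 : List String) : List String :=
  winners.foldl (fun acc i =>
    segment5.foldl (fun acc2 j =>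
      let s := i ++ j
      if removeNonWinners s then acc2 ++ [s] else acc2) acc) []

-- ===== PORT B =====
def scanStep (st : Int × Int × Bool) (ch : Char) : Int × Int × Bool :=
  let lc := if ch == 'L' then st.1 + 1 else st.1
  if ch == 'A' then
    let run := st.2.1 + 1
    (lc, run, if run ≥ 3 then true else st.2.2)
  else (lc, 0, st.2.2)

def scanB (st : Int × Int × Bool) (chunk : List Char) : Int × Int × Bool :=
  chunk.foldl scanStep st

def createNewWinners_alt (winners : List String) (segment5 : List String) : List String :=
  let wstates := winners.map (fun w => (w, scanB (0, 0, false) w.toList))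
  wstates.foldl (fun acc p =>
    segment5.foldl (fun acc2 seg =>
      let r := scanB p.2 seg.toList
      if !r.2.2 && r.1 ≤ 1 then acc2 ++ [p.1 ++ seg] else acc2) acc) []

-- ===== PRECONDITION & SPEC =====
def Spec_createNewWinners (winners : List String) (segment5 : List String) (out : List String) : Prop := out = createNewWinners_alt winners segment5
instance (winners : List String) (segment5 : List String) (out : List String) : Decidable (Spec_createNewWinners winners segment5 out) := by unfold Spec_createNewWinners; infer_instance

-- ===== CLAIM (what is proved, stated in full; the proofs are below) =====
def Claim_equal_createNewWinners : Prop := ∀ (winners : List String) (segment5 : List String), Dom_createNewWinners winners segment5 → Spec_createNewWinners winners segment5 (createNewWinners winners segment5)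

-- ===== LEMMAS AND PROOFS =====

-- count of 'L' characters
def lcnt : List Char → Int
  | [] => 0
  | c :: t => (if c == 'L' then 1 else 0) + lcnt t

-- structural three-in-a-row 'A' detector
def has3 : List Char → Bool
  | a :: b :: c :: t => (a == 'A' && b == 'A' && c == 'A') || has3 (b :: c :: t)
  | _ => false

def runAux (r : Int) : List Char → Int
  | [] => r
  | c :: t => if c == 'A' then runAux (r + 1) t else runAux 0 t

def deadAux (r : Int) : List Char → Bool
  | [] => false
  | c :: t => if c == 'A' then (decide (r + 1 ≥ 3) || deadAux (r + 1) t) else deadAux 0 t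

theorem scanB_eq (l : List Char) : ∀ (lc r : Int) (d : Bool),
    scanB (lc, r, d) l = (lc + lcnt l, runAux r l, d || deadAux r l) := by
  induction l with
  | nil => intro lc r d; simp [scanB, lcnt, runAux, deadAux]
  | cons c t ih =>
    intro lc r d
    simp only [scanB, List.foldl_cons] at *
    by_cases hA : c == 'A' <;> by_cases hL : c == 'L' <;>
      simp [scanStep, hA, hL, ih, lcnt, runAux, deadAux, Bool.or_assoc] <;> ring_nf <;>
      simp [Bool.or_comm, Bool.or_assoc]

theorem lcount_foldl (l : List Char) : ∀ acc : Int,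
    l.foldl (fun acc c => if c == 'L' then acc + 1 else acc) acc = acc + lcnt l := by
  induction l with
  | nil => intro acc; simp [lcnt]
  | cons c t ih =>
    intro acc
    simp only [List.foldl_cons]
    rw [ih]
    by_cases h : c == 'L' <;> simp [h, lcnt] <;> ring

theorem has3_cons2_ne (a c : Char) (t : List Char) (h : ¬ c = 'A') :
    has3 (a :: c :: t) = has3 (c :: t) := by
  match t with
  | [] => simp [has3]
  | c2 :: t' => simp [has3, h]

theorem has3_cons_ne (c : Char) (t : List Char) (h : ¬ c = 'A') : has3 (c :: t) = has3 t := by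
  match t with
  | [] => simp [has3]
  | [b] => simp [has3]
  | b :: c2 :: t' => simp [has3, h]

-- deadAux r l tracks has3 of r pending 'A's followed by l (for r ≤ 2)
theorem deadAux_eq_has3 (l : List Char) : ∀ r : Int, 0 ≤ r → r ≤ 2 →
    deadAux r l = has3 (List.replicate r.toNat 'A' ++ l) := by
  induction l with
  | nil =>
    intro r h0 h2
    interval_cases r <;> simp [deadAux, has3]
  | cons c t ih =>
    intro r h0 h2
    by_cases hA : c = 'A'
    · subst hA
      by_cases hr : r = 2
      · subst hr
        simp [deadAux, has3, List.replicate]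
      · have h1 : r ≤ 1 := by omega
        have : deadAux r ('A' :: t) = deadAux (r + 1) t := by
          simp [deadAux]; omega
        rw [this, ih (r + 1) (by omega) (by omega)]
        have hrep : List.replicate (r + 1).toNat 'A' = List.replicate r.toNat 'A' ++ ['A'] := by
          have : (r + 1).toNat = r.toNat + 1 := by omega
          rw [this, List.replicate_succ']
        rw [hrep]
        simp
    · have : deadAux r (c :: t) = deadAux 0 t := by simp [deadAux, hA]
      rw [this, ih 0 le_rfl (by omega)]
      have e1 := has3_cons_ne c t hA
      have e2 := has3_cons2_ne 'A' c t hA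
      interval_cases r <;> simp [List.replicate, has3, hA, e1, e2]

-- A's window scan over any index list is an 'any'
theorem rnwAAA_any (s : String) (idxs : List Int) :
    rnwAAA s idxs = idxs.any (fun i => PySem.Str.slice s (some i) (some (i + 3)) == "AAA") := by
  induction idxs with
  | nil => rfl
  | cons i rest ih =>
    by_cases h : PySem.Str.slice s (some i) (some (i + 3)) == "AAA" <;>
      simp [rnwAAA, h, ih]

-- the window test at a natural index, on the list side
theorem slice_window (s : String) (k : Nat) :
    (PySem.Str.slice s (some (k : Int)) (some ((k : Int) + 3)) == "AAA")
      = ((s.toList.drop k).take 3 == ['A', 'A', 'A']) := by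
  have hl : (PySem.Str.slice s (some (k : Int)) (some ((k : Int) + 3))).toList
      = (s.toList.drop k).take 3 := by
    have h3 : ((k : Int) + 3) = ((k + 3 : Nat) : Int) := by push_cast; ring
    simp only [PySem.Str.toList_slice, PySem.Chars.slice_eq_listSlice]
    rw [h3, PySem.List.slice_natCast]
    congr 1
    omega
  rcases eq_or_ne (PySem.Str.slice s (some (k : Int)) (some ((k : Int) + 3))) "AAA" with h | h
  · have ht : (s.toList.drop k).take 3 = ['A', 'A', 'A'] := by
      rw [← hl, h]; decide
    simp [h, ht]
  · have ht : ¬ ((s.toList.drop k).take 3 = ['A', 'A', 'A']) := by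
      intro hh
      exact h (String.toList_inj.mp (by rw [hl, hh]; decide))
    simp [h, ht]

theorem any_range_has3 (l : List Char) :
    (List.range (l.length - 2)).any (fun k => (l.drop k).take 3 == ['A', 'A', 'A']) = has3 l := by
  induction l with
  | nil => simp [has3]
  | cons c t ih =>
    rcases t with _ | ⟨b, _ | ⟨c2, t'⟩⟩
    · simp [has3]
    · simp [has3]
    · have hn : (c :: b :: c2 :: t').length - 2 = t'.length + 1 := by simp
      have hn2 : (b :: c2 :: t').length - 2 = t'.length := by simp
      rw [hn, List.range_succ_eq_map, List.any_cons, List.any_map]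
      have hcomp : ((fun k => ((c :: b :: c2 :: t').drop k).take 3 == ['A','A','A']) ∘ Nat.succ)
          = (fun k => ((b :: c2 :: t').drop k).take 3 == ['A','A','A']) := rfl
      rw [hcomp, ← hn2, ih]
      show (([c, b, c2] : List Char) == ['A','A','A'] || has3 (b :: c2 :: t'))
          = has3 (c :: b :: c2 :: t')
      have hbeq : (([c, b, c2] : List Char) == ['A','A','A'])
          = (c == 'A' && b == 'A' && c2 == 'A') := by
        by_cases h1 : c = 'A' <;> by_cases h2 : b = 'A' <;> by_cases h3 : c2 = 'A' <;>
          simp [h1, h2, h3, Bool.and_assoc]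
      rw [hbeq]
      simp [has3]

-- main pointwise lemma: A's validity test equals B's automaton result
theorem removeNonWinners_eq (s : String) :
    removeNonWinners s = (!(scanB (0, 0, false) s.toList).2.2 && (scanB (0, 0, false) s.toList).1 ≤ 1) := by
  unfold removeNonWinners
  rw [rnwAAA_any, scanB_eq, lcount_foldl]
  have hrange : PySem.List.pyRange 0 (PySem.Str.len s - 2) 1
      = (List.range (s.toList.length - 2)).map (fun k : Nat => (k : Int)) := by
    rw [PySem.List.pyRange_one]
    have hlen : PySem.Str.len s = (s.toList.length : Int) := by simp
    rw [hlen]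
    have : ((s.toList.length : Int) - 2 - 0).toNat = s.toList.length - 2 := by omega
    rw [this]
    simp
  rw [hrange, List.any_map]
  have hwin : ((fun i => PySem.Str.slice s (some i) (some (i + 3)) == "AAA") ∘ (fun k : Nat => (k : Int)))
      = fun k : Nat => ((s.toList.drop k).take 3 == ['A','A','A']) := by
    funext k
    exact slice_window s k
  rw [hwin, any_range_has3]
  have hd := deadAux_eq_has3 s.toList 0 le_rfl (by omega)
  simp only [Int.toNat_zero, List.replicate_zero, List.nil_append] at hd
  rw [← hd]
  by_cases hdd : deadAux 0 s.toList <;> by_cases hc : lcnt s.toList > 1 <;>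
    simp [hdd, hc] <;> omega

theorem inner_eq (segment5 : List String) (w : String) : ∀ acc : List String,
    segment5.foldl (fun acc2 j => if removeNonWinners (w ++ j) then acc2 ++ [w ++ j] else acc2) acc
      = segment5.foldl (fun acc2 seg =>
          let r := scanB (scanB (0, 0, false) w.toList) seg.toList
          if !r.2.2 && r.1 ≤ 1 then acc2 ++ [w ++ seg] else acc2) acc := by
  induction segment5 with
  | nil => intro acc; rfl
  | cons j rest ih =>
    intro acc
    simp only [List.foldl_cons]
    have hsc : scanB (scanB (0, 0, false) w.toList) j.toList = scanB (0, 0, false) (w ++ j).toList := by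
      rw [show (w ++ j).toList = w.toList ++ j.toList by simp]
      simp [scanB, List.foldl_append]
    rw [removeNonWinners_eq (w ++ j)]
    simp only [hsc]
    exact ih _

theorem outer_eq (winners segment5 : List String) : ∀ acc : List String,
    winners.foldl (fun acc i =>
        segment5.foldl (fun acc2 j => if removeNonWinners (i ++ j) then acc2 ++ [i ++ j] else acc2) acc) acc
      = (winners.map (fun w => (w, scanB (0, 0, false) w.toList))).foldl (fun acc p =>
          segment5.foldl (fun acc2 seg =>
            let r := scanB p.2 seg.toList
            if !r.2.2 && r.1 ≤ 1 then acc2 ++ [p.1 ++ seg] else acc2) acc) acc := by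
  induction winners with
  | nil => intro acc; rfl
  | cons w rest ih =>
    intro acc
    simp only [List.map_cons, List.foldl_cons]
    rw [inner_eq segment5 w acc]
    exact ih _

-- ===== VERDICT (by name: the statement is the Claim_ definition above) =====
theorem createNewWinners_spec : Claim_equal_createNewWinners := by
  intro winners segment5 _
  unfold Spec_createNewWinners createNewWinners createNewWinners_alt
  exact outer_eq winners segment5 []
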